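-- pv_equiv track=rewrite | github.com/Pocsek/mini-dbms | commands.py | bracket_started
-- ===== SOURCE A (Python) =====
-- def bracket_started(li: list[str]) -> bool:
--     # check if a bracket has started but not closed
--     bracket_count = 0
--     for token in li:
--         if token == "(":
--             bracket_count += 1
--         elif token == ")":
--             bracket_count -= 1
--             if bracket_count < 0:
--                 # closing bracket before opening bracket
--                 return False
--     return bracket_count > 0
-- ===== SOURCE B (Python) =====
-- def bracket_started(li):
--     # build all running prefix balances, then aggregate: no early exit
--     deltas = [1 if t == "(" else (-1 if t == ")" else 0) for t in li]
--     prefixes = []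
--     total = 0
--     for d in deltas:
--         total += d
--         prefixes.append(total)
--     return bool(prefixes) and all(p >= 0 for p in prefixes) and prefixes[-1] > 0
-- ===== Notes on version B (the rewrite author's own statement) =====
-- stated objective: alternative
-- what changed: Replaces the short-circuit increment-and-early-return scan with building the full list of running prefix balances and then aggregating it (all prefixes nonnegative and last prefix positive).
import Mathlib
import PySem

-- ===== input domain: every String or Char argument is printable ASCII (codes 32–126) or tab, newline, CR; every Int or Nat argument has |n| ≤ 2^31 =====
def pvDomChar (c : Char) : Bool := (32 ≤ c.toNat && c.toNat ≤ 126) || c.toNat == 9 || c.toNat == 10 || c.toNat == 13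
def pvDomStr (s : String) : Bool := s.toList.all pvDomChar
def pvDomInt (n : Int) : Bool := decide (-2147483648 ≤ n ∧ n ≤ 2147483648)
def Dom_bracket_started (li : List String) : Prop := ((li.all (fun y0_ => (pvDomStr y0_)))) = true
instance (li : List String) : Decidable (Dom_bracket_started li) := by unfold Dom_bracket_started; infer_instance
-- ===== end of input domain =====

-- B replaces A's early-return counting scan with building the full list of running
-- prefix balances and aggregating it (all nonnegative, last positive): an alternative
-- decomposition of the same O(n) task.

-- ===== PORT A =====
def pvGoA : Int → List String → Bool
  | c, [] => decide (c > 0)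
  | c, t :: ts =>
    if t = "(" then pvGoA (c + 1) ts
    else if t = ")" then
      (if c - 1 < 0 then false else pvGoA (c - 1) ts)
    else pvGoA c ts

def bracket_started (li : List String) : Bool := pvGoA 0 li

-- ===== PORT B =====
def pvDelta (t : String) : Int := if t = "(" then 1 else if t = ")" then -1 else 0

def pvAccum : Int → List Int → List Int
  | _, [] => []
  | a, d :: ds => (a + d) :: pvAccum (a + d) ds

def bracket_started_alt (li : List String) : Bool :=
  let deltas := li.map pvDelta
  let prefixes := pvAccum 0 deltas
  match prefixes with
  | [] => false
  | p :: rest =>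
    ((p :: rest).all (fun x => decide (0 ≤ x))) && decide ((p :: rest).getLastD 0 > 0)

-- ===== PRECONDITION & SPEC =====
def Spec_bracket_started (li : List String) (out : Bool) : Prop := out = bracket_started_alt li
instance (li : List String) (out : Bool) : Decidable (Spec_bracket_started li out) := by unfold Spec_bracket_started; infer_instance

-- ===== CLAIM (what is proved, stated in full; the proofs are below) =====
def Claim_equal_bracket_started : Prop := ∀ (li : List String), Dom_bracket_started li → Spec_bracket_started li (bracket_started li)

-- ===== LEMMAS AND PROOFS =====
-- F a ds: B's aggregate over the prefix balances of ds starting from balance a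
def pvF (a : Int) (ds : List Int) : Bool :=
  match pvAccum a ds with
  | [] => decide (a > 0)
  | p :: rest =>
    ((p :: rest).all (fun x => decide (0 ≤ x))) && decide ((p :: rest).getLastD 0 > 0)

theorem pvF_cons_nonneg (a d : Int) (ds : List Int) (h : 0 ≤ a + d) :
    pvF a (d :: ds) = pvF (a + d) ds := by
  unfold pvF
  simp only [pvAccum]
  cases hL : pvAccum (a + d) ds with
  | nil => simp [h, List.getLastD]
  | cons q qs => simp [h, List.getLastD]

theorem pvF_cons_neg (a d : Int) (ds : List Int) (h : a + d < 0) :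
    pvF a (d :: ds) = false := by
  unfold pvF
  simp only [pvAccum]
  cases hL : pvAccum (a + d) ds with
  | nil => simp; omega
  | cons q qs => simp; omega

theorem pvGoA_eq_pvF (li : List String) : ∀ (a : Int), 0 ≤ a →
    pvGoA a li = pvF a (li.map pvDelta) := by
  induction li with
  | nil => intro a _; simp [pvGoA, pvF, pvAccum]
  | cons t ts ih =>
    intro a ha
    simp only [List.map, pvGoA]
    by_cases h1 : t = "("
    · rw [if_pos h1]
      rw [ih (a + 1) (by omega)]
      rw [show pvDelta t = 1 by simp [pvDelta, h1]]
      rw [pvF_cons_nonneg a 1 _ (by omega)]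
    · rw [if_neg h1]
      by_cases h2 : t = ")"
      · rw [if_pos h2, show pvDelta t = -1 by simp [pvDelta, h2]]
        by_cases h3 : a - 1 < 0
        · rw [if_pos h3, pvF_cons_neg a (-1) _ (by omega)]
        · rw [if_neg h3, ih (a - 1) (by omega),
              pvF_cons_nonneg a (-1) _ (by omega), sub_eq_add_neg]
      · rw [if_neg h2, show pvDelta t = 0 by simp [pvDelta, h1, h2],
              pvF_cons_nonneg a 0 _ (by omega), add_zero]
        exact ih a ha


-- ===== VERDICT (by name: the statement is the Claim_ definition above) =====
theorem bracket_started_spec : Claim_equal_bracket_started := by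
  intro li _
  unfold Spec_bracket_started bracket_started bracket_started_alt
  rw [pvGoA_eq_pvF li 0 le_rfl]
  rfl
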